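-- pv_equiv track=rewrite | github.com/lakshay007/InfoSecLab | lab5/q3.py | find_collisions
-- ===== SOURCE A (Python) =====
-- def find_collisions(hashes):
--     seen = set()
--     collisions = set()
--     for h in hashes:
--         if h in seen:
--             collisions.add(h)
--         seen.add(h)
--     return collisions
-- ===== SOURCE B (Python) =====
-- def find_collisions(hashes):
--     first = {}
--     for i, h in enumerate(hashes):
--         first.setdefault(h, i)
--     return {h for i, h in enumerate(hashes) if first[h] < i}
-- ===== Notes on version B (the rewrite author's own statement) =====
-- stated objective: alternative
-- what changed: Replaces A's incremental seen/collisions dual-set loop by an index-based decomposition: first build a dict mapping each hash to its first-occurrence index, then a set comprehension keeps the hashes whose first occurrence lies strictly before their position.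
import Mathlib
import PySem

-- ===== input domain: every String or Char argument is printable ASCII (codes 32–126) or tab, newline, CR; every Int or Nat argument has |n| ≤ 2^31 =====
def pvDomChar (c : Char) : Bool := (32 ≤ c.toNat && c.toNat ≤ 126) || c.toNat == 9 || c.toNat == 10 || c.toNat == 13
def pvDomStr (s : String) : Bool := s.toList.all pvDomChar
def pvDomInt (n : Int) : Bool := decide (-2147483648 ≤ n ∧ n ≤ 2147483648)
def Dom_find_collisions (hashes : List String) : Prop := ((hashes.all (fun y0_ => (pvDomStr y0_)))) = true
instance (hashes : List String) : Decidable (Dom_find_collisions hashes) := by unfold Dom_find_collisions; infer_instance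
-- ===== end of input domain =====

-- B replaces A's incremental seen/collisions dual-set loop by an index-based decomposition:
-- a dict of first-occurrence positions, then one set comprehension keeping the elements whose
-- first occurrence lies strictly before their position (objective: alternative).

-- ===== PORT A =====
def find_collisions (hashes : List String) : List String :=
  (hashes.foldl
    (fun (st : PySem.Set String × PySem.Set String) h =>
      (PySem.Set.add st.1 h,
       if PySem.Set.contains st.1 h then PySem.Set.add st.2 h else st.2))
    (PySem.Set.empty, PySem.Set.empty)).2

-- ===== PORT B =====
def find_collisions_alt (hashes : List String) : List String :=
  let first := (PySem.List.enumerate hashes).foldl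
      (fun (d : PySem.Dict String Int) p => d.setdefault p.2 p.1) PySem.Dict.empty
  (PySem.List.enumerate hashes).foldl
    (fun (s : PySem.Set String) p =>
      -- first[h]: the key is always present (the first loop setdefault'ed every element),
      -- so Python never raises here and getD's default is never used
      if (first.get? p.2).getD p.1 < p.1 then PySem.Set.add s p.2 else s)
    PySem.Set.empty

-- ===== PRECONDITION & SPEC =====
def Spec_find_collisions (hashes : List String) (out : List String) : Prop := out = find_collisions_alt hashes
instance (hashes : List String) (out : List String) : Decidable (Spec_find_collisions hashes out) := by unfold Spec_find_collisions; infer_instance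

-- ===== CLAIM (what is proved, stated in full; the proofs are below) =====
def Claim_equal_find_collisions : Prop := ∀ (hashes : List String), Dom_find_collisions hashes → Spec_find_collisions hashes (find_collisions hashes)

-- ===== LEMMAS AND PROOFS =====

-- after B's first loop, the dict maps each element to its first-occurrence index
theorem dict_first : ∀ (xs : List String) (s0 : Int) (d : PySem.Dict String Int) (h : String),
    ((PySem.List.enumerate xs s0).foldl (fun d p => d.setdefault p.2 p.1) d).get? h
    = if d.contains h = false ∧ h ∈ xs then some (s0 + (List.idxOf h xs : Int)) else d.get? h := by
  intro xs
  induction xs with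
  | nil => intro s0 d h; simp [PySem.List.enumerate_nil]
  | cons x xs ih =>
    intro s0 d h
    rw [PySem.List.enumerate_cons]
    simp only [List.foldl_cons]
    rw [ih]
    by_cases hx : h = x
    · subst hx
      by_cases hc : d.contains h = true
      · have hc' : (d.setdefault h s0).contains h = true := by
          simp [PySem.Dict.contains_setdefault]
        rw [if_neg (by simp [hc']), if_neg (by simp [hc])]
        rw [PySem.Dict.get?_setdefault_self]
        rcases (PySem.Dict.contains_eq_isSome_get? d h) ▸ hc with hs
        cases hv : d.get? h with
        | none => rw [hv] at hs; simp at hs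
        | some v => simp
      · have hcf : d.contains h = false := by simpa using hc
        have hc' : (d.setdefault h s0).contains h = true := by
          simp [PySem.Dict.contains_setdefault]
        rw [if_neg (by simp [hc']), if_pos (by simp [hcf])]
        rw [PySem.Dict.get?_setdefault_self]
        have : d.get? h = none := by
          simp only [PySem.Dict.get?_eq_none_iff_contains]; exact hcf
        simp [this]
    · have hco : (d.setdefault x s0).contains h = d.contains h := by
        simp [PySem.Dict.contains_setdefault, hx]
      have hg : (d.setdefault x s0).get? h = d.get? h :=
        PySem.Dict.get?_setdefault_of_ne _ _ hx
      have hidx : List.idxOf h (x :: xs) = List.idxOf h xs + 1 :=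
        List.idxOf_cons_ne xs (Ne.symm hx)
      simp only [hco, hg, hidx, List.mem_cons, hx, false_or]
      by_cases hc : d.contains h = false ∧ h ∈ xs
      · rw [if_pos hc, if_pos hc]; push_cast; ring_nf
      · rw [if_neg hc, if_neg hc]

-- the invariant relating A's running 'seen' set to B's first-occurrence test
theorem find_collisions_gen (hashes : List String) (first : PySem.Dict String Int)
    (hfirst : ∀ x, x ∈ hashes → first.get? x = some ((List.idxOf x hashes : Nat) : Int)) :
    ∀ (t pre : List String) (s : PySem.Set String), pre ++ t = hashes →
    (t.foldl
      (fun (st : PySem.Set String × PySem.Set String) h =>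
        (PySem.Set.add st.1 h,
         if PySem.Set.contains st.1 h then PySem.Set.add st.2 h else st.2))
      (PySem.Set.ofList pre, s)).2
    = (PySem.List.enumerate t (pre.length : Int)).foldl
        (fun (s : PySem.Set String) p =>
          if (first.get? p.2).getD p.1 < p.1 then PySem.Set.add s p.2 else s) s := by
  intro t
  induction t with
  | nil => intro pre s _; simp [PySem.List.enumerate_nil]
  | cons h t ih =>
    intro pre s happ
    rw [PySem.List.enumerate_cons]
    simp only [List.foldl_cons]
    have hh : h ∈ hashes := by rw [← happ]; simp
    have hget : first.get? h = some ((List.idxOf h hashes : Nat) : Int) := hfirst h hh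
    have hidx : List.idxOf h hashes = if h ∈ pre then List.idxOf h pre else pre.length := by
      rw [← happ]
      by_cases hp : h ∈ pre
      · rw [if_pos hp]; exact List.idxOf_append_of_mem hp
      · rw [if_neg hp, List.idxOf_append_of_notMem hp]; simp
    have hadd : PySem.Set.add (PySem.Set.ofList pre) h = PySem.Set.ofList (pre ++ [h]) := by
      rw [PySem.Set.ofList_eq_foldl, PySem.Set.ofList_eq_foldl, List.foldl_append]
      rfl
    have happ' : pre ++ h :: t = (pre ++ [h]) ++ t := by simp
    have hlen : (((pre ++ [h]).length : Nat) : Int) = (pre.length : Int) + 1 := by simp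
    by_cases hp : h ∈ pre
    · have c1 : PySem.Set.contains (PySem.Set.ofList pre) h = true := by
        simp [PySem.Set.contains, PySem.Set.mem_ofList, hp]
      have c2 : (first.get? h).getD (pre.length : Int) < (pre.length : Int) := by
        rw [hget, Option.getD_some, hidx, if_pos hp]
        exact_mod_cast List.idxOf_lt_length_iff.mpr hp
      rw [if_pos c2, if_pos c1, hadd]
      have := ih (pre ++ [h]) (PySem.Set.add s h) (by rw [← happ, happ'])
      rw [hlen] at this
      exact this
    · have c2 : ¬ (first.get? h).getD (pre.length : Int) < (pre.length : Int) := by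
        rw [hget, Option.getD_some, hidx, if_neg hp]
        exact lt_irrefl _
      rw [if_neg c2, if_neg (by simp [hp]), hadd]
      have := ih (pre ++ [h]) s (by rw [← happ, happ'])
      rw [hlen] at this
      exact this

-- ===== VERDICT (by name: the statement is the Claim_ definition above) =====
theorem find_collisions_spec : Claim_equal_find_collisions := by
  intro hashes _
  unfold Spec_find_collisions find_collisions find_collisions_alt
  have hfirst : ∀ x, x ∈ hashes →
      ((PySem.List.enumerate hashes).foldl
        (fun (d : PySem.Dict String Int) p => d.setdefault p.2 p.1) PySem.Dict.empty).get? x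
      = some ((List.idxOf x hashes : Nat) : Int) := by
    intro x hx
    rw [dict_first]
    simp [hx]
  have := find_collisions_gen hashes _ hfirst hashes [] PySem.Set.empty (by simp)
  simpa using this
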